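/- GENERATED by tools/from_farm_form.py from prooffarm-gif/accepted/DGifGetImageDesc.1/Lemmas.lean (a worked proof of the farm's unit `DGifGetImageDesc.1`,
   accepted by the verdict) — do not edit. -/
import Gif.Spec.Units.DGifGetImageDesc_1
import Gif.Spec.AllSegs

/-!
  Lemmas for the unit `DGifGetImageDesc.1` (0x109460 … 0x10949a and 0x1094a7 … 0x1094b5; dgif_lib.c:430-440): the segment is
  walked in TWO STEPS that meet at the return address 0x1094af (`ret4`) of the call of DGifGetImageHeader, with a private
  assertion there.

      gid1_AtRet4      the assertion at `ret4`: `At` for the callee's heap and forest + the callee's result clauses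
      gid1_seg_call    0x109460 … the call of DGifGetImageHeader … 0x1094af: the function's entry → `gid1_AtRet4`
      gid1_seg_tail    0x1094af … 0x1094b5 (GIF_OK) | 0x10949a (GIF_ERROR): `gid1_AtRet4` → `Mid` ∨ `Done`
-/

open X86 X86.User Asan ProgX.Base ProgX.Base.Spec Gif.Spec

set_option maxRecDepth 4000
set_option maxHeartbeats 4000000

namespace Gif.Spec.DGifGetImageDesc_1

/-- **At 1094AFH (ret4), `DGifGetImageHeader(gif)` has returned**: `At` for the heap `Hc` and the forest `Fc` of the callee's post,
which differs from the entry's in `icm` only; `eax` is GIF_OK or GIF_ERROR, and GIF_OK brings the LZW field ranges. -/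
structure gid1_AtRet4 (H : Heap) (rest : List Obj) (frames : List (Nat × FrameLayout)) (F : Forest) (R : Rd)
    (Hc : Heap) (Fc : Forest) (u₀ e : State) (ret : Word) (v : State) : Prop where
  at_ : DGifGetImageDesc.At Gif.L.DGifGetImageDesc.ret4 H rest frames F R Hc Fc u₀ e ret v
  icm : F.SameButIcm Fc
  bool : IsBool v
  lz : (v.reg .rax).toNat = 1 → LZOK v.mem F.pv

/-- A saved-register slot in the NUMBER form of the assertions, from the word form the frame tactics give. -/
theorem gid1_slot_nat {m : Mem} {a x : Word} (h : UInt64.ofNat (m.readLE a 8) = x) : m.readLE a 8 = x.toNat := by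
  rw [← h]
  exact (toNat_ofNat_addr _ (Mem.readLE_lt m a 8)).symm

/-- **109460H … the call of DGifGetImageHeader … 1094AFH (ret4)** (dgif_lib.c:430-440): the four pushes, `sub rsp, 8`, `rbx = gif`,
the checked load of `gif->Private`, the checked load of `Private->FileState` (`= 8` by `Shape.state`: the arm l.436 is dead),
`DGifGetImageHeader(gif)` with its contract for `H`, `F`, `frames`. -/
theorem gid1_seg_call (Lay : Layout) (hLay : Lay.hi = 0x1000000) (μ : Microarch) (hμ : UserX.MicroOK μ) (u₀ : State)
    (hcode : HasCodeNat Lay u₀ Gif.L.DGifGetImageDesc.entry Gif.Code.code_DGifGetImageDesc.nat Gif.L.DGifGetImageDesc.size)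
    (H : Heap) (rest : List Obj) (frames : List (Nat × FrameLayout)) (F : Forest) (R : Rd) (u : State) (ret : Word)
    (hgh : Calls Lay μ ProgX.Base.WayInv (ProgX.Base.conv u₀) Gif.L.DGifGetImageHeader.entry
      (Gif.Spec.DGifGetImageHeader.spec H rest frames F R))
    (h_load8 : Asan.SmallCheck Lay μ ProgX.Base.WayInv (ProgX.Base.CodeOK u₀) [.rax, .rcx, .rdx] 8
      ProgX.Base.L.__asan_load8_noabort.entry)
    (h_load4 : Asan.SmallCheck Lay μ ProgX.Base.WayInv (ProgX.Base.CodeOK u₀) [.rax, .rcx, .rdx] 4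
      ProgX.Base.L.__asan_load4_noabort.entry)
    (he : AtEntry (conv u₀) Gif.L.DGifGetImageDesc.entry (DGifGetImageDesc.spec H rest frames F R).frame ret u)
    (hpre : (DGifGetImageDesc.spec H rest frames F R).pre u) :
    ReachVia Lay μ ProgX.Base.WayInv u (fun w => ∃ (Hc : Heap) (Fc : Forest), gid1_AtRet4 H rest frames F R Hc Fc u₀ u ret w) := by
  -- THE PRELUDE: the entry, the precondition, where gif, pv and the cursor are (as numbers)
  have he0 := he
  have hpre0 := hpre
  v_entry he
  obtain ⟨henv, hrdi⟩ := hpre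
  have hp := henv.heap
  have hok := henv.ok
  have hbase := hp.base
  have hlimit := hp.limit
  have hgin := hok.owns.inside hp.inv.heap (o := (F.gif, 120)) List.mem_cons_self
  have hpin := hok.owns.inside hp.inv.heap (o := (F.pv, 24936)) (List.mem_cons_of_mem _ List.mem_cons_self)
  simp only at hgin hpin
  rw [hbase] at hgin hpin
  have hg_lo := hgin.1
  have hg_hi := hgin.2.2.2.2
  have hp_lo := hpin.1
  have hp_hi := hpin.2.2.2.2
  clear hgin hpin
  have hcur := henv.ctx.cursor_range hp.inv.shadow
  -- the two loads, as facts about the entry memory in the walker's form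
  have hpriv := hok.shape.priv
  have hstate := hok.shape.state
  simp only [gfield] at hpriv hstate
  have l_priv : u.mem.readLE (u.reg .rdi + 0x70) 8 = F.pv := by
    rw [rd_eq_readLE u.mem (u.reg .rdi + 0x70) (F.gif + 112) 8 (by u_omega)]
    exact hpriv
  have l_state : u.mem.readLE (UInt64.ofNat F.pv) 4 = 8 := by
    rw [rd_eq_readLE u.mem (UInt64.ofNat F.pv) (F.pv) 4 (by u_omega)]
    exact hstate
  -- THE WALK, to the return address of the call (the arm `!IS_READABLE` is pruned: `8 & 8 ≠ 0`)
  u_walk hcode [hμ.vendor] until [Gif.L.DGifGetImageDesc.ret4, Gif.L.DGifGetImageDesc.at_10949a]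
    span [ProgX.Base.L.textLo, ProgX.Base.L.textHi] side (v_side)
  case check_109471 =>
    -- dgif_lib.c:431 the load of `gif->Private`: 8 bytes inside gif
    have hun : ShadowUntouched u.mem s_109471.mem := by v_untouched
    have hl : LiveIn (H.liveObjs ++ rest) frames F.gif 120 := hok.gif_live.liveIn rest frames (Nat.le_refl _) (Nat.le_refl _)
    exact hl.accSmall hp.inv.shadow hun _ 8 (by decide) (by u_omega) (by u_omega)
  case check_10947d =>
    -- dgif_lib.c:434 the load of `Private->FileState`: 4 bytes at the start of pv
    have hun : ShadowUntouched u.mem s_10947d.mem := by v_untouched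
    have hl : LiveIn (H.liveObjs ++ rest) frames F.pv 24936 := hok.pv_live.liveIn rest frames (Nat.le_refl _) (Nat.le_refl _)
    exact hl.accSmall hp.inv.shadow hun _ 4 (by decide) (by u_omega) (by u_omega)
  case call_inv =>
    v_inv
  case pre_1094aa =>
    -- DGifGetImageHeader's precondition: the environment over the function's own stack stores, the same argument
    have hun : ShadowUntouched u.mem s_1094aa.mem := by v_untouched
    have hsame : Mem.SameExcept [⟨(u.reg .rsp).toNat - 496, (u.reg .rsp).toNat⟩] u.mem s_1094aa.mem := by u_same
    have henv' : Env H rest frames F R s_1094aa := by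
      refine henv.sameExcept hun hsame ?_ ?_ ?_ ?_ ?_
      · intro w hw
        have e : w = ⟨(u.reg .rsp).toNat - 496, (u.reg .rsp).toNat⟩ := List.mem_singleton.mp hw
        subst e
        exact Loose.stack hp.inv.heap (by simp only; omega) (by simp only; omega) (by simp only; omega)
      · intro w hw
        have e : w = ⟨(u.reg .rsp).toNat - 496, (u.reg .rsp).toNat⟩ := List.mem_singleton.mp hw
        subst e
        apply HeapWin.offHeap hp.inv.heap
        left
        simp only
        omega
      · rw [w_rsp]
        u_omega
      · rw [w_rsp]
        u_omega
      · rw [w_rsp]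
        u_omega
    refine ⟨henv', ?_⟩
    rw [w_rdi]
    exact hrdi
  -- 0x1094af (ret4): DGifGetImageHeader HAS RETURNED. Its post: a heap, a forest, `Back2`
  obtain ⟨Hc, Fc, hback, hicm, hbool, hlz⟩ := w_post
  -- the reader at the callee's entry is the entry's: only stack was stored to
  have hs0 : Mem.SameExcept [⟨(u.reg .rsp).toNat - 496, (u.reg .rsp).toNat⟩] u.mem s_1094aa.mem := by
    rw [w_mem_1094aa]
    u_same
  have hrem0 : rem R s_1094aa.mem = rem R u.mem := by
    apply rem_sameExcept hs0 (by omega)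
    intro w hw
    have e := List.mem_singleton.mp hw
    rw [e]
    simp only
    omega
  have e_top : (s_1094aa.reg .rsp).toNat + 8 = (u.reg .rsp).toNat - 40 := by
    rw [w_rsp_1094aa]
    u_omega
  -- the callee's footprint in terms of `u` (`w_same : SameExcept […] (nest over u.mem) s_1094aar.mem`)
  v_after_call w_rsp_1094aa w_mem_1094aa
  -- THE SLOTS AND THE RETURN ADDRESS, through the callee's footprint (its stack below, the heap's region, the cursor)
  have hp13 : UInt64.ofNat (s_1094aa.mem.readLE (u.reg .rsp - 8) 8) = u.reg .r13 := by u_resolve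
  rw [w_mem_1094aa] at hp13
  have hs13 : UInt64.ofNat (s_1094aar.mem.readLE (u.reg .rsp - 8) 8) = u.reg .r13 := by u_frame hp13
  have hp12 : UInt64.ofNat (s_1094aa.mem.readLE (u.reg .rsp - 16) 8) = u.reg .r12 := by u_resolve
  rw [w_mem_1094aa] at hp12
  have hs12 : UInt64.ofNat (s_1094aar.mem.readLE (u.reg .rsp - 16) 8) = u.reg .r12 := by u_frame hp12
  have hpbp : UInt64.ofNat (s_1094aa.mem.readLE (u.reg .rsp - 24) 8) = u.reg .rbp := by u_resolve
  rw [w_mem_1094aa] at hpbp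
  have hsbp : UInt64.ofNat (s_1094aar.mem.readLE (u.reg .rsp - 24) 8) = u.reg .rbp := by u_frame hpbp
  have hpbx : UInt64.ofNat (s_1094aa.mem.readLE (u.reg .rsp - 32) 8) = u.reg .rbx := by u_resolve
  rw [w_mem_1094aa] at hpbx
  have hsbx : UInt64.ofNat (s_1094aar.mem.readLE (u.reg .rsp - 32) 8) = u.reg .rbx := by u_frame hpbx
  have hpra : UInt64.ofNat (s_1094aa.mem.readLE (u.reg .rsp) 8) = ret := by u_resolve
  rw [w_mem_1094aa] at hpra
  have hsra : UInt64.ofNat (s_1094aar.mem.readLE (u.reg .rsp) 8) = ret := by u_frame hpra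
  -- the footprint since the entry: the callee's windows lie inside the function's
  have hsame1 : Mem.SameExcept
    [⟨(u.reg .rsp).toNat - 496, (u.reg .rsp).toNat⟩,
     ⟨0x800000, 0x1000020⟩,
     ⟨R.cur, R.cur + 8⟩] u.mem s_1094aar.mem := by u_same
  -- the heap's invariant comes back with the clean stack at the callee's `rsp + 8` = the body's `rsp`
  have hinv1 : HeapInv Hc rest frames ((u.reg .rsp).toNat - 40) s_1094aar.mem := by
    rw [← e_top]
    exact hback.inv
  -- THE EXIT ASSERTION: `At` at `ret4` for the callee's heap and forest, and the callee's result clauses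
  refine ReachVia.done ⟨Hc, Fc, ?_⟩
  exact {
    at_ := {
      entry := he0
      pre := hpre0
      rip := w_rip
      rsp := w_rsp
      rbx := w_rbx
      r14 := w_kept.get .r14 rfl
      r15 := w_kept.get .r15 rfl
      slot_r13 := gid1_slot_nat hs13
      slot_r12 := gid1_slot_nat hs12
      slot_rbp := gid1_slot_nat hsbp
      slot_rbx := gid1_slot_nat hsbx
      slot_ra := hsra
      inv := hinv1
      region := hback.region
      forest := hicm.toIcmSaved
      ok := hback.ok
      rem := by
        rw [← hrem0]
        exact hback.rem
      same := hsame1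
      code := w_code
      abi := w_inv
    }
    icm := hicm
    bool := hbool
    lz := hlz
  }

/-- `At` at another address of the function: the state `s` has the memory, the stack pointer, `rbx`, `r14`, `r15`, DF and MXCSR
of the state `v` the assertion speaks of. -/
theorem gid1_At_move {cut cut' : Word} {H : Heap} {rest : List Obj} {frames : List (Nat × FrameLayout)} {F : Forest} {R : Rd}
    {Hc : Heap} {Fc : Forest} {u₀ e : State} {ret : Word} {v s : State}
    (hat : DGifGetImageDesc.At cut H rest frames F R Hc Fc u₀ e ret v)
    (hrip : s.rip = cut') (hmem : s.mem = v.mem) (hrsp : s.reg .rsp = v.reg .rsp) (hrbx : s.reg .rbx = v.reg .rbx)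
    (hr14 : s.reg .r14 = v.reg .r14) (hr15 : s.reg .r15 = v.reg .r15) (habi : (conv u₀).inv s) :
    DGifGetImageDesc.At cut' H rest frames F R Hc Fc u₀ e ret s := {
  entry := hat.entry
  pre := hat.pre
  rip := hrip
  rsp := hrsp.trans hat.rsp
  rbx := hrbx.trans hat.rbx
  r14 := hr14.trans hat.r14
  r15 := hr15.trans hat.r15
  slot_r13 := by
    rw [hmem]
    exact hat.slot_r13
  slot_r12 := by
    rw [hmem]
    exact hat.slot_r12
  slot_rbp := by
    rw [hmem]
    exact hat.slot_rbp
  slot_rbx := by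
    rw [hmem]
    exact hat.slot_rbx
  slot_ra := by
    rw [hmem]
    exact hat.slot_ra
  inv := by
    rw [hmem]
    exact hat.inv
  region := hat.region
  forest := hat.forest
  ok := by
    rw [hmem]
    exact hat.ok
  rem := by
    rw [hmem]
    exact hat.rem
  same := by
    rw [hmem]
    exact hat.same
  code := by
    rw [hmem]
    exact hat.code
  abi := habi
}

/-- **1094AFH (ret4) … 1094B5H | 10949AH** (dgif_lib.c:440): `ebp = eax`, `test eax, eax`; GIF_ERROR: to the shared exit with
`ebp = 0` and the same counted images (`SameButIcm.imgs`); GIF_OK: to 1094B5H with the LZW field ranges. -/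
theorem gid1_seg_tail (Lay : Layout) (hLay : Lay.hi = 0x1000000) (μ : Microarch) (hμ : UserX.MicroOK μ) (u₀ : State)
    (hcode : HasCodeNat Lay u₀ Gif.L.DGifGetImageDesc.entry Gif.Code.code_DGifGetImageDesc.nat Gif.L.DGifGetImageDesc.size)
    (H : Heap) (rest : List Obj) (frames : List (Nat × FrameLayout)) (F : Forest) (R : Rd) (e : State) (ret : Word)
    (Hc : Heap) (Fc : Forest) (v : State) (hat : gid1_AtRet4 H rest frames F R Hc Fc u₀ e ret v) :
    ReachVia Lay μ ProgX.Base.WayInv v (fun w =>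
      DGifGetImageDesc.Mid Gif.L.DGifGetImageDesc.at_1094b5 H rest frames F R Hc Fc u₀ e ret w ∨
      DGifGetImageDesc.Done H rest frames F R Hc Fc u₀ e ret w) := by
  -- THE PRELUDE: the private assertion, the entry's facts
  obtain ⟨hbody, hicm, hbool, hlz⟩ := hat
  have he := hbody.entry
  v_entry he
  have w_rip := hbody.rip
  have c_rsp : v.reg .rsp = e.reg .rsp - 40 := hbody.rsp
  -- `eax` as a variable `z` (the branch fact of `test eax, eax` speaks of it)
  obtain ⟨z, c_rax⟩ : ∃ z, v.reg .rax = z := ⟨_, rfl⟩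
  have w_kept : RegsKept [.rsp] v v := RegsKept.refl _ _
  have w_eq : Mem.EqOn ProgX.Base.L.textLo ProgX.Base.L.textHi u₀.mem v.mem := ProgX.Base.conv_code_eqOn hbody.code
  have hdf := (show abiInv _ from hbody.abi).1
  have hmx := (show abiInv _ from hbody.abi).2
  have hsse := ProgX.Base.sseOK_of_abiInv hbody.abi
  -- THE WALK, both arms
  u_walk hcode [hμ.vendor] until [Gif.L.DGifGetImageDesc.at_1094b5, Gif.L.DGifGetImageDesc.at_10949a]
    span [ProgX.Base.L.textLo, ProgX.Base.L.textHi] side (v_side)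
  · -- 0x10949a FROM 0x1094b3: GIF_ERROR, `ebp = eax = 0`: the shared exit with the callee's heap and forest
    rw [toNat_part32] at hbr_1094b3
    have hat1 : DGifGetImageDesc.At Gif.L.DGifGetImageDesc.at_10949a H rest frames F R Hc Fc u₀ e ret s_1094b3 := by
      refine gid1_At_move hbody w_rip w_mem (w_rsp.trans c_rsp.symm) (w_kept.get .rbx rfl) (w_kept.get .r14 rfl)
        (w_kept.get .r15 rfl) ?_
      v_inv
    have hres : (s_1094b3.reg .rbp).toNat % 2 ^ 32 = 0 := by
      rw [w_rbp, toNat_ofBV32, toNat_part32, Nat.mod_mod]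
      exact hbr_1094b3
    refine ReachVia.done (Or.inr ?_)
    exact {
      at_ := hat1
      res := Or.inr hres
      ok1 := by
        intro h1
        rw [hres] at h1
        exact absurd h1 (by decide)
      ok0 := by
        intro _
        exact hicm.imgs
    }
  · -- 0x1094b5 FROM 0x1094b3: GIF_OK (`eax ≠ 0`, and `eax` is a boolean: 1): the LZW field ranges hold
    rw [toNat_part32] at hbr_1094b3
    have hz : (v.reg .rax).toNat = 1 := by
      rcases hbool with h1 | h0
      · exact h1
      · exfalso
        rw [c_rax] at h0
        apply hbr_1094b3
        rw [h0]
    have hat1 : DGifGetImageDesc.At Gif.L.DGifGetImageDesc.at_1094b5 H rest frames F R Hc Fc u₀ e ret s_1094b3 := by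
      refine gid1_At_move hbody w_rip w_mem (w_rsp.trans c_rsp.symm) (w_kept.get .rbx rfl) (w_kept.get .r14 rfl)
        (w_kept.get .r15 rfl) ?_
      v_inv
    refine ReachVia.done (Or.inl ?_)
    exact {
      at_ := hat1
      imgs := hicm.imgs
      lz := by
        rw [w_mem]
        exact hlz hz
    }

end Gif.Spec.DGifGetImageDesc_1
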